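-- pv_equiv track=rewrite | github.com/maxmaxou2/poker_project | common/combinations_utils.py | longestSequenceAndIndex
-- ===== SOURCE A (Python) =====
-- def longestSequenceAndIndex(arr) :
--     current_length, max_length, last_index = 0, 0, 0
--     for i in range(len(arr)):
--         if arr[i] != 0:
--             current_length += 1
--         else:
--             if current_length >= max_length :
--                 max_length = current_length
--                 last_index = i-1
--             current_length = 0
--
--     # Update max_length if there's a non-zero sequence at the end
--     if current_length >= max_length :
--         max_length = current_length
--         last_index = len(arr)-1
--
--     return max_length, last_index
-- ===== SOURCE B (Python) =====
-- def longestSequenceAndIndex(arr):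
--     max_length, last_index = 0, len(arr) - 1
--     i, n = 0, len(arr)
--     while i < n:
--         if arr[i] == 0:
--             i += 1
--         else:
--             j = i + 1
--             while j < n and arr[j] != 0:
--                 j += 1
--             if j - i >= max_length:
--                 max_length, last_index = j - i, j - 1
--             i = j
--     return max_length, last_index
-- ===== Notes on version B (the rewrite author's own statement) =====
-- stated objective: alternative
-- what changed: A's single per-element state machine carrying current_length across iterations (plus a post-loop fixup for a trailing run) is replaced by an outer loop over run boundaries with an inner scan that finds each non-zero run's end, updating (max_length,last_index) once per run with last_index initialised to len(arr)-1.
import Mathlib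
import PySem

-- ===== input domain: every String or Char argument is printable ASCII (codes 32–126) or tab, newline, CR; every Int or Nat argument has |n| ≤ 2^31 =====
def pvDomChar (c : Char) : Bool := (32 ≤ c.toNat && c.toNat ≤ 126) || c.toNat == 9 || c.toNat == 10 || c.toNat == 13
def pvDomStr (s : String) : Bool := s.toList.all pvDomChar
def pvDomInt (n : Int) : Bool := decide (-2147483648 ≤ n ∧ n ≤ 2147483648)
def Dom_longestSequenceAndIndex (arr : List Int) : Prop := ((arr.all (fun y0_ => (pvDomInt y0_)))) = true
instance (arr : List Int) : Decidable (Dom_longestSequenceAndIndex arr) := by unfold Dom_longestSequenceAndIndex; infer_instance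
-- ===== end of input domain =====

-- B replaces A's per-element state machine (carrying current_length across iterations plus a
-- post-loop fixup) by an outer loop over run boundaries with an inner scan finding each run's end;
-- objective: alternative decomposition, same O(n) cost.

-- ===== PORT A =====
-- single pass over range(len(arr)) with state (current_length, max_length, last_index)
def stepA (arr : List Int) (st : Int × Int × Int) (i : Int) : Int × Int × Int :=
  if PySem.List.pyGetD arr i 0 ≠ 0 then (st.1 + 1, st.2.1, st.2.2)
  else if st.1 ≥ st.2.1 then (0, st.1, i - 1) else (0, st.2.1, st.2.2)

def longestSequenceAndIndex (arr : List Int) : Int × Int :=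
  let st := (PySem.List.pyRange 0 (PySem.List.len arr) 1).foldl (stepA arr) (0, 0, 0)
  if st.1 ≥ st.2.1 then (st.1, PySem.List.len arr - 1) else (st.2.1, st.2.2)

-- ===== PORT B =====
-- inner while: first index j ≥ start with arr[j] == 0 (or len)
def runEndB (arr : List Int) (j : Nat) : Nat :=
  if h : j < arr.length then (if arr[j] ≠ 0 then runEndB arr (j + 1) else j) else j
termination_by arr.length - j

theorem le_runEndB (arr : List Int) (j : Nat) : j ≤ runEndB arr j := by
  rw [runEndB]
  split
  · split
    · have := le_runEndB arr (j + 1); omega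
    · exact le_refl j
  · exact le_refl j
termination_by arr.length - j

-- outer while over run boundaries
def loopB (arr : List Int) (i : Nat) (mx last : Int) : Int × Int :=
  if h : i < arr.length then
    if arr[i] = 0 then loopB arr (i + 1) mx last
    else
      let j := runEndB arr (i + 1)
      if (j : Int) - (i : Int) ≥ mx then loopB arr j ((j : Int) - (i : Int)) ((j : Int) - 1)
      else loopB arr j mx last
  else (mx, last)
termination_by arr.length - i
decreasing_by
  · omega
  · have := le_runEndB arr (i + 1); omega
  · have := le_runEndB arr (i + 1); omega

def longestSequenceAndIndex_alt (arr : List Int) : Int × Int :=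
  loopB arr 0 0 ((arr.length : Int) - 1)

-- ===== PRECONDITION & SPEC =====
def Spec_longestSequenceAndIndex (arr : List Int) (out : Int × Int) : Prop := out = longestSequenceAndIndex_alt arr
instance (arr : List Int) (out : Int × Int) : Decidable (Spec_longestSequenceAndIndex arr out) := by unfold Spec_longestSequenceAndIndex; infer_instance

-- ===== CLAIM (what is proved, stated in full; the proofs are below) =====
def Claim_equal_longestSequenceAndIndex : Prop := ∀ (arr : List Int), Dom_longestSequenceAndIndex arr → Spec_longestSequenceAndIndex arr (longestSequenceAndIndex arr)

-- ===== LEMMAS AND PROOFS =====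

-- A's post-loop fixup
def finA (arr : List Int) (st : Int × Int × Int) : Int × Int :=
  if st.1 ≥ st.2.1 then (st.1, (arr.length : Int) - 1) else (st.2.1, st.2.2)

theorem runEndB_spec (arr : List Int) :
    ∀ (d s i : Nat), i - s = d → s ≤ i → i ≤ arr.length →
    (∀ k, s ≤ k → k < i → arr.getD k 0 ≠ 0) →
    (i = arr.length ∨ arr.getD i 0 = 0) →
    runEndB arr s = i := by
  intro d
  induction d with
  | zero =>
    intro s i hd hsi _ _ hstop
    have hsi' : s = i := by omega
    subst hsi'
    rw [runEndB]
    rcases hstop with h | h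
    · rw [dif_neg (by omega)]
    · by_cases hl : s < arr.length
      · rw [dif_pos hl]
        rw [List.getD_eq_getElem arr 0 hl] at h
        simp [h]
      · rw [dif_neg hl]
  | succ d ih =>
    intro s i hd hsi hil hnz hstop
    have hs : s < i := by omega
    have hsl : s < arr.length := by omega
    rw [runEndB, dif_pos hsl]
    have hnz0 : arr.getD s 0 ≠ 0 := hnz s (le_refl s) hs
    rw [List.getD_eq_getElem arr 0 hsl] at hnz0
    rw [if_pos hnz0]
    exact ih (s + 1) i (by omega) (by omega) hil (fun k hk1 hk2 => hnz k (by omega) hk2) hstop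

theorem key (arr : List Int) :
    ∀ (d s i : Nat) (mx la lb : Int), arr.length - i = d → s ≤ i → i ≤ arr.length →
    (∀ k, s ≤ k → k < i → arr.getD k 0 ≠ 0) →
    0 ≤ mx → (1 ≤ mx → la = lb) → (mx = 0 → lb = (arr.length : Int) - 1) →
    finA arr ((PySem.List.pyRange (i : Int) ((arr.length : Int)) 1).foldl (stepA arr)
        (((i : Int) - (s : Int)), mx, la))
      = loopB arr s mx lb := by
  intro d
  induction d with
  | zero =>
    intro s i mx la lb hd hsi hil hnz hmx hla hlb
    have hie : i = arr.length := by omega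
    subst hie
    rw [PySem.List.pyRange_one_eq_nil (le_refl _), List.foldl_nil, finA]
    dsimp only
    by_cases hse : s = arr.length
    · subst hse
      simp only [sub_self]
      by_cases h0 : (0 : Int) ≥ mx
      · have hmx0 : mx = 0 := by omega
        rw [if_pos h0, loopB, dif_neg (by omega), hlb hmx0, hmx0]
      · rw [if_neg h0, loopB, dif_neg (by omega), hla (by omega)]
    · -- trailing nonzero run s..length
      have hs : s < arr.length := by omega
      have hnz0 : arr.getD s 0 ≠ 0 := hnz s (le_refl s) (by omega)
      rw [List.getD_eq_getElem arr 0 hs] at hnz0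
      rw [loopB, dif_pos hs, if_neg hnz0]
      have hre : runEndB arr (s + 1) = arr.length :=
        runEndB_spec arr (arr.length - (s + 1)) (s + 1) arr.length rfl (by omega) (le_refl _)
          (fun k hk1 hk2 => hnz k (by omega) hk2) (Or.inl rfl)
      simp only [hre]
      by_cases hge : ((arr.length : Int) - (s : Int)) ≥ mx
      · rw [if_pos hge, if_pos hge, loopB, dif_neg (by omega)]
      · rw [if_neg hge, if_neg hge, loopB, dif_neg (by omega), hla (by omega)]
  | succ d ih =>
    intro s i mx la lb hd hsi hil hnz hmx hla hlb
    have hi : i < arr.length := by omega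
    rw [PySem.List.pyRange_one_cons (by exact_mod_cast hi), List.foldl_cons]
    by_cases hz : arr.getD i 0 = 0
    · -- arr[i] == 0 : A closes the current run here
      have hzE : arr[i] = 0 := by rw [← List.getD_eq_getElem arr 0 hi]; exact hz
      have hstep : stepA arr (((i : Int) - (s : Int)), mx, la) (i : Int)
          = if ((i : Int) - (s : Int)) ≥ mx then ((0 : Int), (i : Int) - (s : Int), (i : Int) - 1)
            else ((0 : Int), mx, la) := by
        have hz' : arr[i]?.getD 0 = 0 := by rw [← List.getD_eq_getElem?_getD]; exact hz
        rw [stepA]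
        rw [if_neg (by simp [PySem.List.pyGetD_natCast, hz'])]
      by_cases hse : s = i
      · -- empty current run
        subst hse
        rw [loopB, dif_pos hi, if_pos hzE]
        by_cases h0 : ((s : Int) - (s : Int)) ≥ mx
        · have hmx0 : mx = 0 := by omega
          rw [hstep, if_pos h0]
          have := ih (s + 1) (s + 1) 0 ((s : Int) - 1) lb (by omega) (le_refl _) (by omega)
            (by omega) (le_refl 0) (by omega) (fun _ => hlb hmx0)
          push_cast at this
          simp only [sub_self] at this ⊢
          rw [hmx0]
          exact this
        · rw [hstep, if_neg h0]
          have := ih (s + 1) (s + 1) mx la lb (by omega) (le_refl _) (by omega)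
            (by omega) hmx hla hlb
          push_cast at this
          simp only [sub_self] at this ⊢
          exact this
      · -- nonempty run s..i, B scans it in one inner loop
        have hs : s < i := by omega
        have hsl : s < arr.length := by omega
        have hnz0 : arr.getD s 0 ≠ 0 := hnz s (le_refl s) hs
        rw [List.getD_eq_getElem arr 0 hsl] at hnz0
        rw [loopB, dif_pos hsl, if_neg hnz0]
        have hre : runEndB arr (s + 1) = i :=
          runEndB_spec arr (i - (s + 1)) (s + 1) i rfl (by omega) (by omega)
            (fun k hk1 hk2 => hnz k (by omega) hk2) (Or.inr hz)
        simp only [hre]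
        by_cases hge : ((i : Int) - (s : Int)) ≥ mx
        · rw [hstep, if_pos hge, if_pos hge]
          rw [loopB, dif_pos hi, if_pos hzE]
          have := ih (i + 1) (i + 1) ((i : Int) - (s : Int)) ((i : Int) - 1) ((i : Int) - 1)
            (by omega) (le_refl _) (by omega) (by omega) (by omega) (fun _ => rfl) (by omega)
          push_cast at this
          simp only [sub_self] at this ⊢
          exact this
        · rw [hstep, if_neg hge, if_neg hge]
          rw [loopB, dif_pos hi, if_pos hzE]
          have := ih (i + 1) (i + 1) mx la lb (by omega) (le_refl _) (by omega) (by omega)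
            hmx hla hlb
          push_cast at this
          simp only [sub_self] at this ⊢
          exact this
    · -- arr[i] != 0 : the run grows
      have hstep : stepA arr (((i : Int) - (s : Int)), mx, la) (i : Int)
          = (((i : Int) - (s : Int)) + 1, mx, la) := by
        rw [stepA]
        have hz' : ¬ arr[i]?.getD 0 = 0 := by rw [← List.getD_eq_getElem?_getD]; exact hz
        rw [if_pos (by simp [PySem.List.pyGetD_natCast, hz'])]
      rw [hstep]
      have := ih s (i + 1) mx la lb (by omega) (by omega) (by omega)
        (fun k hk1 hk2 => by
          by_cases hki : k < i
          · exact hnz k hk1 hki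
          · have hke : k = i := by omega
            subst hke; exact hz)
        hmx hla hlb
      push_cast at this
      have harith : ((i : Int) - (s : Int)) + 1 = (i : Int) + 1 - (s : Int) := by ring
      rw [harith]
      exact this

-- ===== VERDICT (by name: the statement is the Claim_ definition above) =====
theorem longestSequenceAndIndex_spec : Claim_equal_longestSequenceAndIndex := by
  intro arr _
  unfold Spec_longestSequenceAndIndex longestSequenceAndIndex longestSequenceAndIndex_alt
  have := key arr arr.length 0 0 0 0 ((arr.length : Int) - 1) (by omega) (le_refl 0)
    (by omega) (by omega) (le_refl 0) (by omega) (fun _ => rfl)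
  simp only [Nat.cast_zero, sub_zero, finA] at this
  simpa [PySem.List.len_eq] using this
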